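-- pv_equiv track=rewrite | github.com/catalinprg/crypto-setups | src/news.py | _filter_by_relevance
-- ===== SOURCE A (Python) =====
-- def _filter_by_relevance(items: list[dict], terms: list[str]) -> list[dict]:
--     """Keep items that mention ANY term in headline + summary. Case-insensitive
--     substring match. Falls back to unfiltered when `terms` is empty."""
--     if not terms:
--         return items
--     terms_lower = [t.lower() for t in terms if t]
--     kept = []
--     for it in items:
--         text = " ".join([
--             (it.get("headline") or ""),
--             (it.get("summary") or ""),
--         ]).lower()
--         if any(t in text for t in terms_lower):
--             kept.append(it)
--     return kept
-- ===== SOURCE B (Python) =====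
-- def _filter_by_relevance(items: list[dict], terms: list[str]) -> list[dict]:
--     """Transposed strategy: compute each item's searchable text once, then loop
--     over the terms (outer) marking the set of matched item indices, and finally
--     emit the items whose index was marked, in original order."""
--     if not terms:
--         return items
--     terms_lower = [t.lower() for t in terms if t]
--     texts = [" ".join([(it.get("headline") or ""), (it.get("summary") or "")]).lower()
--              for it in items]
--     matched = set()
--     for t in terms_lower:
--         for i, text in enumerate(texts):
--             if t in text:
--                 matched.add(i)
--     return [it for i, it in enumerate(items) if i in matched]
-- ===== Notes on version B (the rewrite author's own statement) =====
-- stated objective: alternative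
-- what changed: B precomputes each item's lowered text once, transposes the loops (terms outer, items inner) to build a set of matched item indices, and emits items by index membership, instead of A's per-item any() scan over terms with short-circuit and repeated text construction inside one filtering pass.
import Mathlib
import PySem

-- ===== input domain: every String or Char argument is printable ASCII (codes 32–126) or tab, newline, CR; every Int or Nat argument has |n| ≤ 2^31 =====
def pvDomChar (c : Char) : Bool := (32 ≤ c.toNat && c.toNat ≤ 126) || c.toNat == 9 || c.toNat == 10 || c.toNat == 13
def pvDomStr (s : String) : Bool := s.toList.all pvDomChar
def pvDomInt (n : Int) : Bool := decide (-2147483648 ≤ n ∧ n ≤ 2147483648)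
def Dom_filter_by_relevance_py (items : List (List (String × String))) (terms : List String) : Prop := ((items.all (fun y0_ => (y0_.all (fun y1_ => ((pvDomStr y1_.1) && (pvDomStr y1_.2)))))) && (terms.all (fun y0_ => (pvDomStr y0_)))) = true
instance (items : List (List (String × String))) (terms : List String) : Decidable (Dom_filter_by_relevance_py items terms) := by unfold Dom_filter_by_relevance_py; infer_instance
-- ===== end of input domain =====

-- B replaces A's per-item any()-over-terms filtering pass by a transposed strategy (texts precomputed once;
-- terms outer, items inner marking a set of matched indices; output by index membership) — alternative, same cost.

-- ===== PORT A =====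
-- shared text builder: the identical Python line `" ".join([(it.get("headline") or ""), (it.get("summary") or "")]).lower()`
def pvItemText (it : List (String × String)) : String :=
  PySem.Str.lower (PySem.Str.join " " [PySem.Dict.getD ⟨it⟩ "headline" "", PySem.Dict.getD ⟨it⟩ "summary" ""])

def filter_by_relevance_py (items : List (List (String × String))) (terms : List String) : List (List (String × String)) :=
  if terms = [] then items
  else
    let terms_lower := (terms.filter (fun t => t != "")).map PySem.Str.lower
    let kept := items.foldl (fun kept it =>
      let text := pvItemText it
      if terms_lower.any (fun t => PySem.Str.isIn t text) then kept ++ [it] else kept) []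
    kept

-- ===== PORT B =====
def filter_by_relevance_py_alt (items : List (List (String × String))) (terms : List String) : List (List (String × String)) :=
  if terms = [] then items
  else
    let terms_lower := (terms.filter (fun t => t != "")).map PySem.Str.lower
    let texts := items.map pvItemText
    let matched := terms_lower.foldl (fun m t =>
      (PySem.List.enumerate texts).foldl (fun m p =>
        if PySem.Str.isIn t p.2 then PySem.Set.add m p.1 else m) m) PySem.Set.empty
    ((PySem.List.enumerate items).filter (fun p => PySem.Set.contains matched p.1)).map (fun p => p.2)

-- ===== PRECONDITION & SPEC =====
def Spec_filter_by_relevance_py (items : List (List (String × String))) (terms : List String) (out : List (List (String × String))) : Prop := out = filter_by_relevance_py_alt items terms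
instance (items : List (List (String × String))) (terms : List String) (out : List (List (String × String))) : Decidable (Spec_filter_by_relevance_py items terms out) := by unfold Spec_filter_by_relevance_py; infer_instance

-- ===== CLAIM (what is proved, stated in full; the proofs are below) =====
def Claim_equal_filter_by_relevance_py : Prop := ∀ (items : List (List (String × String))) (terms : List String), Dom_filter_by_relevance_py items terms → Spec_filter_by_relevance_py items terms (filter_by_relevance_py items terms)

-- ===== LEMMAS AND PROOFS =====

-- membership after B's inner loop over one term
lemma pv_inner_mem (t : String) (l : List (Int × String)) (m : PySem.Set Int) (j : Int) :
    j ∈ l.foldl (fun m p => if PySem.Str.isIn t p.2 then PySem.Set.add m p.1 else m) m ↔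
      j ∈ m ∨ ∃ p ∈ l, p.1 = j ∧ PySem.Str.isIn t p.2 = true := by
  induction l generalizing m with
  | nil => simp
  | cons q l ih =>
    simp only [List.foldl_cons, List.mem_cons]
    by_cases h : PySem.Str.isIn t q.2 = true
    · rw [if_pos h, ih]
      simp only [PySem.Set.mem_add]
      constructor
      · rintro ((hm | rfl) | ⟨p, hp, hj, ht⟩)
        · exact Or.inl hm
        · exact Or.inr ⟨q, Or.inl rfl, rfl, h⟩
        · exact Or.inr ⟨p, Or.inr hp, hj, ht⟩
      · rintro (hm | ⟨p, rfl | hp, hj, ht⟩)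
        · exact Or.inl (Or.inl hm)
        · exact Or.inl (Or.inr hj.symm)
        · exact Or.inr ⟨p, hp, hj, ht⟩
    · rw [if_neg h, ih]
      constructor
      · rintro (hm | ⟨p, hp, hj, ht⟩)
        · exact Or.inl hm
        · exact Or.inr ⟨p, Or.inr hp, hj, ht⟩
      · rintro (hm | ⟨p, rfl | hp, hj, ht⟩)
        · exact Or.inl hm
        · exact absurd ht h
        · exact Or.inr ⟨p, hp, hj, ht⟩

-- membership after B's double loop
lemma pv_outer_mem (ts : List String) (l : List (Int × String)) (m : PySem.Set Int) (j : Int) :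
    j ∈ ts.foldl (fun m t => l.foldl (fun m p => if PySem.Str.isIn t p.2 then PySem.Set.add m p.1 else m) m) m ↔
      j ∈ m ∨ ∃ t ∈ ts, ∃ p ∈ l, p.1 = j ∧ PySem.Str.isIn t p.2 = true := by
  induction ts generalizing m with
  | nil => simp
  | cons t ts ih =>
    simp only [List.foldl_cons, ih, pv_inner_mem, List.mem_cons]
    constructor
    · rintro ((hm | hx) | ⟨t', ht', w⟩)
      · exact Or.inl hm
      · exact Or.inr ⟨t, Or.inl rfl, hx⟩
      · exact Or.inr ⟨t', Or.inr ht', w⟩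
    · rintro (hm | ⟨t', rfl | ht', w⟩)
      · exact Or.inl (Or.inl hm)
      · exact Or.inl (Or.inr w)
      · exact Or.inr ⟨t', ht', w⟩

-- filtering enumerate by an index predicate that agrees with a value predicate
lemma pv_filter_enumerate {α : Type} (xs : List α) (c : Int → Bool) (p : α → Bool) (s : Int)
    (h : ∀ (k : Nat) (hk : k < xs.length), c (s + k) = p xs[k]) :
    ((PySem.List.enumerate xs s).filter (fun q => c q.1)).map (fun q => q.2) = xs.filter p := by
  induction xs generalizing s with
  | nil => simp [PySem.List.enumerate_nil]
  | cons x xs ih =>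
    rw [PySem.List.enumerate_cons]
    have h0 : c s = p x := by simpa using h 0 (by simp)
    have ih' := ih (s + 1) (fun k hk => by
      have := h (k + 1) (by simpa using Nat.succ_lt_succ hk)
      simpa [add_assoc, Int.add_comm 1 (k : Int)] using this)
    simp only [List.filter_cons, h0]
    by_cases hx : p x = true
    · simp [hx, ih']
    · simp [hx, ih']

-- ===== VERDICT (by name: the statement is the Claim_ definition above) =====
theorem filter_by_relevance_py_spec : Claim_equal_filter_by_relevance_py := by
  intro items terms _
  unfold Spec_filter_by_relevance_py filter_by_relevance_py filter_by_relevance_py_alt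
  by_cases hT : terms = []
  · simp [hT]
  · rw [if_neg hT, if_neg hT]
    simp only []   -- zeta-reduce the `let`s on both sides
    rw [PySem.List.foldl_append_if]
    simp only [List.nil_append, List.map_id']
    refine (pv_filter_enumerate items _ _ 0 ?_).symm
    intro k hk
    rw [Bool.eq_iff_iff, PySem.Set.contains_iff, pv_outer_mem]
    simp only [PySem.Set.empty, List.not_mem_nil, false_or, List.any_eq_true,
      PySem.List.mem_enumerate_iff]
    constructor
    · rintro ⟨t, ht, p, ⟨k', hk', rfl⟩, hj, hin⟩
      have hkk : k' = k := by exact_mod_cast (by simpa using hj : ((k' : Int)) = (k : Int))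
      subst hkk
      exact ⟨t, ht, by simpa using hin⟩
    · rintro ⟨t, ht, hin⟩
      exact ⟨t, ht, ((0 : Int) + k, pvItemText items[k]),
        ⟨k, by simpa using hk, by simp⟩, rfl, hin⟩
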